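-- pv_equiv track=rewrite | github.com/JippevdMaaden/AoC2021 | star15/main.py | count_output_digits
-- ===== SOURCE A (Python) =====
-- def count_output_digits(output_list):
--     digit_count_dict = {}
--     for output in output_list:
--         for value in output:
--             number_of_digits = len(value)
--             current_value_count = digit_count_dict.get(number_of_digits, 0)
--             digit_count_dict[number_of_digits] = current_value_count + 1
--
--     return digit_count_dict
-- ===== SOURCE B (Python) =====
-- def count_output_digits(output_list):
--     lengths = [len(v) for out in output_list for v in out]
--     return _tally(lengths)
--
--
-- def _tally(lengths):
--     # divide and conquer: count each half recursively, then merge the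
--     # right half's counter into the left half's (left positions kept,
--     # new keys appended), which preserves first-occurrence key order
--     if len(lengths) <= 1:
--         return {l: 1 for l in lengths}
--     mid = len(lengths) // 2
--     counts = _tally(lengths[:mid])
--     for length, c in _tally(lengths[mid:]).items():
--         counts[length] = counts.get(length, 0) + c
--     return counts
-- ===== Notes on version B (the rewrite author's own statement) =====
-- stated objective: alternative
-- what changed: Replaces A's single-pass nested-loop dict accumulation with a divide-and-conquer tally: flatten the value lengths once, split the list in halves, count each half recursively, and merge the right half's counter into the left's (left positions kept, new keys appended), which preserves A's first-occurrence key order.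
import Mathlib
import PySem

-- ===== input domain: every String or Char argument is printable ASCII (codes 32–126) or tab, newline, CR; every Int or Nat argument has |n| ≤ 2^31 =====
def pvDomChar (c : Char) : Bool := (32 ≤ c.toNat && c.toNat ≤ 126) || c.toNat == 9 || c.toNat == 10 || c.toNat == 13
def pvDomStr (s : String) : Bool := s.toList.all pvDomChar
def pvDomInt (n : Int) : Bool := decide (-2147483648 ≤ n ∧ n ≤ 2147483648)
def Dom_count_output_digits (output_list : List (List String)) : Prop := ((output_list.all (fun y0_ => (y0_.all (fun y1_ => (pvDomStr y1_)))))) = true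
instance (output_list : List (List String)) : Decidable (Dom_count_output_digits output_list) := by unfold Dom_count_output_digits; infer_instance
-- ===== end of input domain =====

-- B replaces A's single-pass nested-loop dict accumulation by a divide-and-conquer tally: split the flat length list in half, tally each half recursively, merge the right counter into the left (alternative decomposition, same result and order).


-- ===== PORT A =====
def count_output_digits (output_list : List (List String)) : List (Int × Int) :=
  let digit_count_dict : PySem.Dict Int Int :=
    output_list.foldl (fun d output =>
      output.foldl (fun d value =>
        let number_of_digits : Int := PySem.Str.len value
        let current_value_count : Int := d.getD number_of_digits 0
        d.insert number_of_digits (current_value_count + 1)) d) PySem.Dict.empty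
  digit_count_dict.items

-- ===== PORT B =====
-- port of Source B's _tally: halve, recurse, merge right counts into left
def pvTally (lengths : List Int) : PySem.Dict Int Int :=
  if _h : lengths.length ≤ 1 then
    PySem.Dict.ofList (lengths.map (fun l => (l, (1 : Int))))
  else
    let mid : Int := PySem.Int.floordiv (lengths.length : Int) 2
    let counts := pvTally (PySem.List.slice lengths none (some mid))
    (pvTally (PySem.List.slice lengths (some mid) none)).items.foldl
      (fun d p => d.insert p.1 (d.getD p.1 0 + p.2)) counts
termination_by lengths.length
decreasing_by
  · rw [show PySem.Int.floordiv ((lengths.length : Nat) : Int) 2 = ((lengths.length / 2 : Nat) : Int) from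
        PySem.Int.floordiv_natCast _ 2, PySem.List.slice_to_natCast]
    simp [List.length_take]; omega
  · rw [show PySem.Int.floordiv ((lengths.length : Nat) : Int) 2 = ((lengths.length / 2 : Nat) : Int) from
        PySem.Int.floordiv_natCast _ 2, PySem.List.slice_from_natCast]
    simp [List.length_drop]; omega

def count_output_digits_alt (output_list : List (List String)) : List (Int × Int) :=
  let lengths : List Int := output_list.flatMap (fun out => out.map (fun v => PySem.Str.len v))
  (pvTally lengths).items

-- ===== PRECONDITION & SPEC =====
def Spec_count_output_digits (output_list : List (List String)) (out : List (Int × Int)) : Prop := out = count_output_digits_alt output_list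
instance (output_list : List (List String)) (out : List (Int × Int)) : Decidable (Spec_count_output_digits output_list out) := by unfold Spec_count_output_digits; infer_instance

-- ===== CLAIM (what is proved, stated in full; the proofs are below) =====
def Claim_equal_count_output_digits : Prop := ∀ (output_list : List (List String)), Dom_count_output_digits output_list → Spec_count_output_digits output_list (count_output_digits output_list)

-- ===== LEMMAS AND PROOFS =====

-- A's nested loop over output_list/output is the flat loop over the flattened list of lengths.
theorem foldl_nested_eq_foldl_flatMap (l : List (List String))
    (g : PySem.Dict Int Int → Int → PySem.Dict Int Int) (d : PySem.Dict Int Int)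
    (f : String → Int) :
    l.foldl (fun d out => out.foldl (fun d v => g d (f v)) d) d = (l.flatMap (·.map f)).foldl g d := by
  induction l generalizing d with
  | nil => rfl
  | cons h t ih => simp [List.foldl_map, ih]

-- the merge loop's lookups: starting value plus the summed counts carried at key k
theorem getD_merge_fold (e : List (Int × Int)) (d : PySem.Dict Int Int) (k : Int) :
    (e.foldl (fun d p => d.insert p.1 (d.getD p.1 0 + p.2)) d).getD k 0
      = d.getD k 0 + ((e.filter (fun p => p.1 == k)).map (·.2)).sum := by
  induction e generalizing d with
  | nil => simp
  | cons p t ih =>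
    simp only [List.foldl_cons, ih, List.filter_cons]
    by_cases hk : p.1 = k
    · simp [hk]; ring
    · simp [hk, PySem.Dict.getD_insert, Ne.symm hk]

-- a nodup list filtered for one element
theorem filter_beq_of_nodup (s : List Int) (k : Int) (hnd : s.Nodup) :
    s.filter (fun x => x == k) = if k ∈ s then [k] else [] := by
  induction s with
  | nil => simp
  | cons a t ih =>
    simp only [List.nodup_cons] at hnd
    by_cases ha : a = k
    · subst ha
      simp only [List.filter_cons, List.mem_cons]
      simp [hnd.1]
      intro x hx hxa
      exact hnd.1 (hxa ▸ hx)
    · simp [ha, ih hnd.2, List.mem_cons, Ne.symm ha]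

-- merging Counter(ys) into Counter(xs) is Counter(xs ++ ys)
theorem merge_counter (xs ys : List Int) :
    ((PySem.Dict.counter ys).items.foldl (fun d p => d.insert p.1 (d.getD p.1 0 + p.2))
      (PySem.Dict.counter xs)) = PySem.Dict.counter (xs ++ ys) := by
  have hndL : ((PySem.Dict.counter ys : PySem.Dict Int Int).items.foldl (fun d p => d.insert p.1 (d.getD p.1 0 + p.2)) (PySem.Dict.counter xs)).keys.Nodup :=
    PySem.Dict.nodup_keys_foldl_insert_key _ Prod.fst _ _ (PySem.Dict.nodup_keys_counter xs)
  have hkeys : ((PySem.Dict.counter ys : PySem.Dict Int Int).items.foldl (fun d p => d.insert p.1 (d.getD p.1 0 + p.2)) (PySem.Dict.counter xs)).keys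
      = (PySem.Dict.counter (xs ++ ys) : PySem.Dict Int Int).keys := by
    rw [PySem.Dict.keys_foldl_insert_key]
    have : (PySem.Dict.counter ys : PySem.Dict Int Int).items.map Prod.fst = (PySem.Dict.counter ys : PySem.Dict Int Int).keys := rfl
    rw [this, PySem.Dict.keys_counter, PySem.Dict.keys_counter, PySem.Dict.keys_counter,
        PySem.Set.update_eq_append_filter, PySem.Set.ofList_ofList,
        PySem.Set.ofList_append, PySem.Set.update_eq_append_filter]
  have hgetD : ∀ k : Int, ((PySem.Dict.counter ys : PySem.Dict Int Int).items.foldl (fun d p => d.insert p.1 (d.getD p.1 0 + p.2)) (PySem.Dict.counter xs)).getD k 0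
      = (PySem.Dict.counter (xs ++ ys) : PySem.Dict Int Int).getD k 0 := by
    intro k
    rw [getD_merge_fold, PySem.Dict.getD_counter, PySem.Dict.getD_counter, PySem.Dict.items_counter]
    rw [List.filter_map]
    have hfil : (PySem.Set.ofList ys).filter ((fun p => p.1 == k) ∘ (fun k' => (k', (ys.count k' : Int))))
        = if k ∈ ys then [k] else [] := by
      have hc : ((fun p : Int × Int => p.1 == k) ∘ (fun k' => (k', (ys.count k' : Int)))) = (fun k' => k' == k) := by
        funext x; simp
      rw [hc, filter_beq_of_nodup _ _ (PySem.Set.nodup_ofList ys)]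
      simp [PySem.Set.mem_ofList]
    rw [hfil]
    by_cases hk : k ∈ ys
    · simp [hk, List.count_append]
    · simp [hk, List.count_append, List.count_eq_zero_of_not_mem hk]
  apply PySem.Dict.ext
  rw [PySem.Dict.items_eq_map_keys _ hndL (0 : Int),
      PySem.Dict.items_eq_map_keys _ (PySem.Dict.nodup_keys_counter (xs ++ ys)) (0 : Int), hkeys]
  exact List.map_congr_left (fun k _ => by rw [hgetD])

-- the divide-and-conquer tally computes Counter
theorem pvTally_eq_counter (ls : List Int) : pvTally ls = PySem.Dict.counter ls := by
  induction ls using pvTally.induct with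
  | case1 ls h =>
    rw [pvTally, dif_pos h]
    match ls, h with
    | [], _ => rfl
    | [_], _ => rfl
  | case2 ls h mid ih1 ih2 =>
    rw [pvTally, dif_neg h]
    simp only
    have hmid : mid = ((ls.length / 2 : Nat) : Int) := PySem.Int.floordiv_natCast _ 2
    rw [hmid] at ih1 ih2
    rw [show PySem.Int.floordiv ((ls.length : Nat) : Int) 2 = ((ls.length / 2 : Nat) : Int) from
        PySem.Int.floordiv_natCast _ 2]
    rw [PySem.List.slice_to_natCast] at ih1 ⊢
    rw [PySem.List.slice_from_natCast] at ih2 ⊢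
    rw [ih1, ih2, merge_counter, List.take_append_drop]

-- ===== VERDICT (by name: the statement is the Claim_ definition above) =====
theorem count_output_digits_spec : Claim_equal_count_output_digits := by
  intro output_list _
  show count_output_digits output_list = count_output_digits_alt output_list
  simp only [count_output_digits, count_output_digits_alt]
  rw [foldl_nested_eq_foldl_flatMap output_list (fun d k => d.insert k (d.getD k 0 + 1))
        PySem.Dict.empty (fun v => PySem.Str.len v),
      PySem.Dict.foldl_insert_getD_add_one_eq_counter, pvTally_eq_counter]
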